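-- pv_equiv track=rewrite | github.com/renatahodovan/grammarinator | grammarinator/tool/processor.py | printable_ranges
-- ===== SOURCE A (Python) =====
-- def printable_ranges(lower_bound: int, upper_bound: int) -> list[tuple[int, int]]:
--     ranges = []
--     range_start = None
--     for c in range(lower_bound, upper_bound):
--         if chr(c).isprintable():
--             if range_start is None:
--                 range_start = c
--         else:
--             if range_start is not None:
--                 ranges.append((range_start, c))
--                 range_start = None
--
--     if range_start is not None:
--         ranges.append((range_start, upper_bound))
--     return ranges
-- ===== SOURCE B (Python) =====
-- # B: walks a compact delta-encoded table of the maximal printable-codepoint ranges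
-- # (gap-from-previous-end, length), clipping each decoded range to [lower_bound, upper_bound),
-- # instead of testing every codepoint with chr(c).isprintable() (objective: faster).
--
-- _DELTAS = [
--     (32, 95), (34, 12), (1, 714), (2, 6), (4, 7), (1, 1), (1, 20), (1, 397),
--     (1, 38), (2, 50), (2, 3), (1, 55), (8, 27), (4, 6), (17, 22), (1, 192),
--     (1, 48), (2, 59), (2, 101), (14, 59), (2, 49), (2, 15), (1, 28), (2, 1),
--     (1, 11), (5, 31), (9, 74), (1, 161), (1, 8), (2, 2), (2, 22), (1, 7),
--     (1, 1), (3, 4), (2, 9), (2, 2), (2, 4), (8, 1), (4, 2), (1, 5),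
--     (2, 25), (2, 3), (1, 6), (4, 2), (2, 22), (1, 7), (1, 2), (1, 2),
--     (1, 2), (2, 1), (1, 5), (4, 2), (2, 3), (3, 1), (7, 4), (1, 1),
--     (7, 17), (10, 3), (1, 9), (1, 3), (1, 22), (1, 7), (1, 2), (1, 5),
--     (2, 10), (1, 3), (1, 3), (2, 1), (15, 4), (2, 12), (7, 7), (1, 3),
--     (1, 8), (2, 2), (2, 22), (1, 7), (1, 2), (1, 5), (2, 9), (2, 2),
--     (2, 3), (7, 3), (4, 2), (1, 5), (2, 18), (10, 2), (1, 6), (3, 3),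
--     (1, 4), (3, 2), (1, 1), (1, 2), (3, 2), (3, 3), (3, 12), (4, 5),
--     (3, 3), (1, 4), (2, 1), (6, 1), (14, 21), (5, 13), (1, 3), (1, 23),
--     (1, 16), (2, 9), (1, 3), (1, 4), (7, 2), (1, 3), (2, 1), (2, 4),
--     (2, 10), (7, 22), (1, 3), (1, 23), (1, 10), (1, 5), (2, 9), (1, 3),
--     (1, 4), (7, 2), (6, 2), (1, 4), (2, 10), (1, 2), (13, 13), (1, 3),
--     (1, 51), (1, 3), (1, 6), (4, 16), (2, 26), (1, 3), (1, 18), (3, 24),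
--     (1, 9), (1, 1), (2, 7), (3, 1), (4, 6), (1, 1), (1, 8), (6, 10),
--     (2, 3), (12, 58), (4, 29), (37, 2), (1, 1), (1, 5), (1, 24), (1, 1),
--     (1, 23), (2, 5), (1, 1), (1, 6), (2, 10), (2, 4), (32, 72), (1, 36),
--     (4, 39), (1, 36), (1, 15), (1, 13), (37, 198), (1, 1), (5, 1), (2, 377),
--     (1, 4), (2, 7), (1, 1), (1, 4), (2, 41), (1, 4), (2, 33), (1, 4),
--     (2, 7), (1, 1), (1, 4), (2, 15), (1, 57), (1, 4), (2, 67), (2, 32),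
--     (3, 26), (6, 86), (2, 6), (2, 640), (1, 28), (3, 89), (7, 22), (9, 24),
--     (9, 20), (12, 13), (1, 3), (1, 2), (12, 94), (2, 10), (6, 10), (6, 14),
--     (1, 11), (6, 89), (7, 43), (5, 70), (10, 31), (1, 12), (4, 12), (4, 1),
--     (3, 42), (2, 5), (11, 44), (4, 26), (6, 11), (3, 62), (2, 65), (1, 29),
--     (2, 11), (6, 10), (6, 14), (2, 31), (49, 77), (3, 47), (1, 116), (8, 60),
--     (3, 15), (3, 60), (7, 43), (2, 11), (8, 43), (5, 534), (2, 6), (2, 38),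
--     (2, 6), (2, 8), (1, 1), (1, 1), (1, 1), (1, 31), (2, 53), (1, 15),
--     (1, 14), (2, 6), (1, 19), (2, 3), (1, 9), (17, 24), (8, 47), (17, 2),
--     (2, 27), (1, 13), (3, 33), (15, 33), (15, 140), (4, 663), (25, 11), (21, 1812),
--     (2, 32), (1, 349), (5, 45), (1, 1), (5, 1), (2, 56), (7, 2), (14, 24),
--     (9, 7), (1, 7), (1, 7), (1, 7), (1, 7), (1, 7), (1, 7), (1, 7),
--     (1, 126), (34, 26), (1, 89), (12, 214), (26, 12), (5, 63), (1, 86), (2, 103),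
--     (5, 43), (1, 94), (1, 84), (12, 47), (1, 29293), (3, 55), (9, 348), (20, 184),
--     (8, 203), (5, 2), (1, 1), (1, 5), (24, 59), (3, 10), (6, 56), (8, 70),
--     (8, 12), (6, 116), (11, 30), (3, 78), (1, 11), (4, 33), (1, 55), (9, 14),
--     (2, 10), (2, 103), (24, 28), (10, 6), (2, 6), (2, 6), (9, 7), (1, 7),
--     (1, 60), (4, 126), (2, 10), (6, 11172), (12, 23), (4, 49), (8452, 366), (2, 106),
--     (38, 7), (12, 5), (5, 26), (1, 5), (1, 1), (1, 2), (1, 2), (1, 125),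
--     (16, 445), (2, 54), (7, 1), (32, 42), (6, 51), (1, 19), (1, 4), (4, 5),
--     (1, 135), (4, 190), (3, 6), (2, 6), (2, 6), (2, 3), (3, 7), (1, 7),
--     (13, 2), (2, 12), (1, 26), (1, 19), (1, 2), (1, 15), (2, 14), (34, 123),
--     (5, 3), (4, 45), (3, 88), (1, 13), (3, 1), (47, 46), (130, 29), (3, 49),
--     (15, 28), (4, 36), (9, 30), (5, 43), (5, 30), (1, 37), (4, 14), (42, 158),
--     (2, 10), (6, 36), (4, 36), (4, 40), (8, 52), (11, 12), (1, 15), (1, 7),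
--     (1, 2), (1, 11), (1, 15), (1, 7), (1, 2), (67, 311), (9, 22), (10, 8),
--     (24, 6), (1, 42), (1, 9), (69, 6), (2, 1), (1, 44), (1, 2), (3, 1),
--     (2, 23), (1, 72), (8, 9), (48, 19), (1, 2), (5, 33), (3, 27), (5, 1),
--     (64, 56), (4, 20), (2, 50), (1, 2), (5, 8), (1, 3), (1, 29), (2, 3),
--     (4, 10), (7, 9), (7, 64), (32, 39), (4, 12), (9, 54), (3, 29), (2, 27),
--     (5, 26), (7, 4), (12, 7), (80, 73), (55, 51), (13, 51), (7, 46), (8, 10),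
--     (294, 31), (1, 42), (1, 3), (2, 2), (78, 40), (8, 42), (22, 26), (38, 28),
--     (20, 23), (9, 78), (4, 36), (9, 62), (1, 5), (13, 25), (7, 10), (6, 53),
--     (1, 18), (8, 39), (9, 96), (1, 20), (11, 18), (1, 44), (65, 7), (1, 1),
--     (1, 4), (1, 15), (1, 11), (6, 59), (5, 10), (6, 4), (1, 8), (2, 2),
--     (2, 22), (1, 7), (1, 2), (1, 5), (1, 10), (2, 2), (2, 3), (2, 1),
--     (6, 1), (5, 7), (2, 7), (3, 5), (139, 92), (1, 5), (30, 72), (8, 10),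
--     (166, 54), (2, 38), (34, 69), (11, 10), (6, 13), (19, 58), (6, 10), (54, 27),
--     (2, 15), (4, 23), (185, 60), (100, 83), (12, 8), (2, 1), (2, 8), (1, 2),
--     (1, 30), (1, 2), (2, 12), (9, 10), (70, 8), (2, 46), (2, 11), (27, 72),
--     (8, 83), (13, 73), (263, 9), (1, 45), (1, 14), (10, 29), (3, 32), (2, 22),
--     (1, 14), (73, 7), (1, 2), (1, 44), (3, 1), (1, 2), (1, 9), (8, 10),
--     (6, 6), (1, 2), (1, 37), (1, 2), (1, 6), (7, 10), (310, 25), (183, 1),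
--     (15, 50), (13, 923), (102, 111), (1, 5), (11, 196), (2636, 99), (13, 1071), (4049, 583),
--     (8633, 569), (7, 31), (1, 10), (4, 81), (1, 10), (6, 30), (2, 6), (10, 70),
--     (10, 10), (1, 7), (1, 21), (5, 19), (688, 91), (101, 75), (4, 57), (7, 17),
--     (64, 5), (11, 2), (14, 6136), (8, 1238), (42, 9), (8935, 4), (1, 7), (1, 2),
--     (1, 291), (45, 3), (17, 4), (8, 396), (2308, 107), (5, 13), (3, 9), (7, 10),
--     (2, 4), (4704, 46), (2, 23), (9, 116), (60, 246), (10, 39), (2, 74), (8, 112),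
--     (21, 70), (154, 20), (12, 87), (9, 25), (135, 85), (1, 71), (1, 2), (2, 1),
--     (2, 2), (2, 4), (1, 12), (1, 1), (1, 7), (1, 65), (1, 4), (2, 8),
--     (1, 7), (1, 28), (1, 4), (1, 5), (1, 1), (3, 7), (1, 340), (2, 292),
--     (2, 702), (15, 5), (1, 15), (1104, 31), (225, 7), (1, 17), (2, 7), (1, 2),
--     (1, 5), (213, 45), (3, 14), (2, 10), (4, 2), (320, 31), (17, 58), (5, 1),
--     (1248, 7), (1, 4), (1, 2), (1, 15), (1, 197), (2, 16), (41, 76), (4, 10),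
--     (4, 2), (785, 68), (76, 61), (194, 4), (1, 27), (1, 2), (1, 1), (2, 1),
--     (1, 10), (1, 4), (1, 1), (1, 1), (6, 1), (4, 1), (1, 1), (1, 1),
--     (1, 3), (1, 2), (1, 1), (2, 1), (1, 1), (1, 1), (1, 1), (1, 1),
--     (1, 2), (1, 1), (2, 4), (1, 7), (1, 4), (1, 4), (1, 1), (1, 10),
--     (1, 17), (5, 3), (1, 5), (1, 17), (52, 2), (270, 44), (4, 100), (12, 15),
--     (2, 15), (1, 15), (1, 37), (10, 174), (56, 29), (13, 44), (4, 9), (7, 2),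
--     (14, 6), (154, 984), (5, 16), (3, 13), (3, 116), (12, 89), (7, 12), (4, 1),
--     (15, 12), (4, 56), (8, 10), (6, 40), (8, 30), (2, 2), (78, 340), (12, 14),
--     (2, 5), (3, 5), (3, 7), (9, 29), (3, 11), (5, 6), (10, 10), (6, 8),
--     (8, 7), (9, 147), (1, 55), (37, 10), (1030, 42720), (32, 4153), (7, 222), (2, 5762),
--     (14, 7473), (3103, 542), (1506, 4939), (716213, 240),
-- ]
--
--
-- def printable_ranges(lower_bound: int, upper_bound: int) -> list[tuple[int, int]]:
--     if upper_bound <= lower_bound: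
--         return []
--     result = []
--     pos = 0
--     for gap, length in _DELTAS:
--         start = pos + gap
--         end = start + length
--         if start >= upper_bound:
--             break
--         if end > lower_bound:
--             result.append((max(start, lower_bound), min(end, upper_bound)))
--         pos = end
--     return result
-- ===== Notes on version B (the rewrite author's own statement) =====
-- stated objective: faster
-- what changed: Instead of testing every codepoint in [lower_bound, upper_bound) with chr(c).isprintable(), B walks a compact precomputed delta-encoded table of the 700 maximal printable-codepoint ranges (decoding (gap, length) pairs with a running position) and clips each decoded range to the query, breaking early once a range starts at or after upper_bound.
import Mathlib
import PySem

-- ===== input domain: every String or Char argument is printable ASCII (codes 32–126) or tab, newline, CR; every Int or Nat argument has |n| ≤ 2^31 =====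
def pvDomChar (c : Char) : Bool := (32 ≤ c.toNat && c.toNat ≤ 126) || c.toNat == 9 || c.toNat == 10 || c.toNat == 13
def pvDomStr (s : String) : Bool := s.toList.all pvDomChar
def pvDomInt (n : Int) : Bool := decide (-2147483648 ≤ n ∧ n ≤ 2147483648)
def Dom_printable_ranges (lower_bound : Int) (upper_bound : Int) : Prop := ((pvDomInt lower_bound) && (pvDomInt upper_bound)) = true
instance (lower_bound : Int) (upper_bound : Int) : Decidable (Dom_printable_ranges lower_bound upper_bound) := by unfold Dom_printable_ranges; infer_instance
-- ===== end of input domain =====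

-- B replaces A's per-codepoint scan of [lower,upper) by walking a compact delta-encoded
-- table of the maximal printable-codepoint ranges and clipping (objective: faster).

-- ===== PORT A =====
-- Table of the maximal ranges [s, e) of printable codepoints (Python 3.11 Unicode data);
-- `chr(c).isprintable()` for 0 <= c < 0x110000 is exactly membership in one of these ranges.
def printableTable : List (Int × Int) := [
  (32, 127), (161, 173), (174, 888), (890, 896), (900, 907), (908, 909), (910, 930), (931, 1328),
  (1329, 1367), (1369, 1419), (1421, 1424), (1425, 1480), (1488, 1515), (1519, 1525), (1542, 1564), (1565, 1757),
  (1758, 1806), (1808, 1867), (1869, 1970), (1984, 2043), (2045, 2094), (2096, 2111), (2112, 2140), (2142, 2143),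
  (2144, 2155), (2160, 2191), (2200, 2274), (2275, 2436), (2437, 2445), (2447, 2449), (2451, 2473), (2474, 2481),
  (2482, 2483), (2486, 2490), (2492, 2501), (2503, 2505), (2507, 2511), (2519, 2520), (2524, 2526), (2527, 2532),
  (2534, 2559), (2561, 2564), (2565, 2571), (2575, 2577), (2579, 2601), (2602, 2609), (2610, 2612), (2613, 2615),
  (2616, 2618), (2620, 2621), (2622, 2627), (2631, 2633), (2635, 2638), (2641, 2642), (2649, 2653), (2654, 2655),
  (2662, 2679), (2689, 2692), (2693, 2702), (2703, 2706), (2707, 2729), (2730, 2737), (2738, 2740), (2741, 2746),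
  (2748, 2758), (2759, 2762), (2763, 2766), (2768, 2769), (2784, 2788), (2790, 2802), (2809, 2816), (2817, 2820),
  (2821, 2829), (2831, 2833), (2835, 2857), (2858, 2865), (2866, 2868), (2869, 2874), (2876, 2885), (2887, 2889),
  (2891, 2894), (2901, 2904), (2908, 2910), (2911, 2916), (2918, 2936), (2946, 2948), (2949, 2955), (2958, 2961),
  (2962, 2966), (2969, 2971), (2972, 2973), (2974, 2976), (2979, 2981), (2984, 2987), (2990, 3002), (3006, 3011),
  (3014, 3017), (3018, 3022), (3024, 3025), (3031, 3032), (3046, 3067), (3072, 3085), (3086, 3089), (3090, 3113),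
  (3114, 3130), (3132, 3141), (3142, 3145), (3146, 3150), (3157, 3159), (3160, 3163), (3165, 3166), (3168, 3172),
  (3174, 3184), (3191, 3213), (3214, 3217), (3218, 3241), (3242, 3252), (3253, 3258), (3260, 3269), (3270, 3273),
  (3274, 3278), (3285, 3287), (3293, 3295), (3296, 3300), (3302, 3312), (3313, 3315), (3328, 3341), (3342, 3345),
  (3346, 3397), (3398, 3401), (3402, 3408), (3412, 3428), (3430, 3456), (3457, 3460), (3461, 3479), (3482, 3506),
  (3507, 3516), (3517, 3518), (3520, 3527), (3530, 3531), (3535, 3541), (3542, 3543), (3544, 3552), (3558, 3568),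
  (3570, 3573), (3585, 3643), (3647, 3676), (3713, 3715), (3716, 3717), (3718, 3723), (3724, 3748), (3749, 3750),
  (3751, 3774), (3776, 3781), (3782, 3783), (3784, 3790), (3792, 3802), (3804, 3808), (3840, 3912), (3913, 3949),
  (3953, 3992), (3993, 4029), (4030, 4045), (4046, 4059), (4096, 4294), (4295, 4296), (4301, 4302), (4304, 4681),
  (4682, 4686), (4688, 4695), (4696, 4697), (4698, 4702), (4704, 4745), (4746, 4750), (4752, 4785), (4786, 4790),
  (4792, 4799), (4800, 4801), (4802, 4806), (4808, 4823), (4824, 4881), (4882, 4886), (4888, 4955), (4957, 4989),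
  (4992, 5018), (5024, 5110), (5112, 5118), (5120, 5760), (5761, 5789), (5792, 5881), (5888, 5910), (5919, 5943),
  (5952, 5972), (5984, 5997), (5998, 6001), (6002, 6004), (6016, 6110), (6112, 6122), (6128, 6138), (6144, 6158),
  (6159, 6170), (6176, 6265), (6272, 6315), (6320, 6390), (6400, 6431), (6432, 6444), (6448, 6460), (6464, 6465),
  (6468, 6510), (6512, 6517), (6528, 6572), (6576, 6602), (6608, 6619), (6622, 6684), (6686, 6751), (6752, 6781),
  (6783, 6794), (6800, 6810), (6816, 6830), (6832, 6863), (6912, 6989), (6992, 7039), (7040, 7156), (7164, 7224),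
  (7227, 7242), (7245, 7305), (7312, 7355), (7357, 7368), (7376, 7419), (7424, 7958), (7960, 7966), (7968, 8006),
  (8008, 8014), (8016, 8024), (8025, 8026), (8027, 8028), (8029, 8030), (8031, 8062), (8064, 8117), (8118, 8133),
  (8134, 8148), (8150, 8156), (8157, 8176), (8178, 8181), (8182, 8191), (8208, 8232), (8240, 8287), (8304, 8306),
  (8308, 8335), (8336, 8349), (8352, 8385), (8400, 8433), (8448, 8588), (8592, 9255), (9280, 9291), (9312, 11124),
  (11126, 11158), (11159, 11508), (11513, 11558), (11559, 11560), (11565, 11566), (11568, 11624), (11631, 11633), (11647, 11671),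
  (11680, 11687), (11688, 11695), (11696, 11703), (11704, 11711), (11712, 11719), (11720, 11727), (11728, 11735), (11736, 11743),
  (11744, 11870), (11904, 11930), (11931, 12020), (12032, 12246), (12272, 12284), (12289, 12352), (12353, 12439), (12441, 12544),
  (12549, 12592), (12593, 12687), (12688, 12772), (12784, 12831), (12832, 42125), (42128, 42183), (42192, 42540), (42560, 42744),
  (42752, 42955), (42960, 42962), (42963, 42964), (42965, 42970), (42994, 43053), (43056, 43066), (43072, 43128), (43136, 43206),
  (43214, 43226), (43232, 43348), (43359, 43389), (43392, 43470), (43471, 43482), (43486, 43519), (43520, 43575), (43584, 43598),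
  (43600, 43610), (43612, 43715), (43739, 43767), (43777, 43783), (43785, 43791), (43793, 43799), (43808, 43815), (43816, 43823),
  (43824, 43884), (43888, 44014), (44016, 44026), (44032, 55204), (55216, 55239), (55243, 55292), (63744, 64110), (64112, 64218),
  (64256, 64263), (64275, 64280), (64285, 64311), (64312, 64317), (64318, 64319), (64320, 64322), (64323, 64325), (64326, 64451),
  (64467, 64912), (64914, 64968), (64975, 64976), (65008, 65050), (65056, 65107), (65108, 65127), (65128, 65132), (65136, 65141),
  (65142, 65277), (65281, 65471), (65474, 65480), (65482, 65488), (65490, 65496), (65498, 65501), (65504, 65511), (65512, 65519),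
  (65532, 65534), (65536, 65548), (65549, 65575), (65576, 65595), (65596, 65598), (65599, 65614), (65616, 65630), (65664, 65787),
  (65792, 65795), (65799, 65844), (65847, 65935), (65936, 65949), (65952, 65953), (66000, 66046), (66176, 66205), (66208, 66257),
  (66272, 66300), (66304, 66340), (66349, 66379), (66384, 66427), (66432, 66462), (66463, 66500), (66504, 66518), (66560, 66718),
  (66720, 66730), (66736, 66772), (66776, 66812), (66816, 66856), (66864, 66916), (66927, 66939), (66940, 66955), (66956, 66963),
  (66964, 66966), (66967, 66978), (66979, 66994), (66995, 67002), (67003, 67005), (67072, 67383), (67392, 67414), (67424, 67432),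
  (67456, 67462), (67463, 67505), (67506, 67515), (67584, 67590), (67592, 67593), (67594, 67638), (67639, 67641), (67644, 67645),
  (67647, 67670), (67671, 67743), (67751, 67760), (67808, 67827), (67828, 67830), (67835, 67868), (67871, 67898), (67903, 67904),
  (67968, 68024), (68028, 68048), (68050, 68100), (68101, 68103), (68108, 68116), (68117, 68120), (68121, 68150), (68152, 68155),
  (68159, 68169), (68176, 68185), (68192, 68256), (68288, 68327), (68331, 68343), (68352, 68406), (68409, 68438), (68440, 68467),
  (68472, 68498), (68505, 68509), (68521, 68528), (68608, 68681), (68736, 68787), (68800, 68851), (68858, 68904), (68912, 68922),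
  (69216, 69247), (69248, 69290), (69291, 69294), (69296, 69298), (69376, 69416), (69424, 69466), (69488, 69514), (69552, 69580),
  (69600, 69623), (69632, 69710), (69714, 69750), (69759, 69821), (69822, 69827), (69840, 69865), (69872, 69882), (69888, 69941),
  (69942, 69960), (69968, 70007), (70016, 70112), (70113, 70133), (70144, 70162), (70163, 70207), (70272, 70279), (70280, 70281),
  (70282, 70286), (70287, 70302), (70303, 70314), (70320, 70379), (70384, 70394), (70400, 70404), (70405, 70413), (70415, 70417),
  (70419, 70441), (70442, 70449), (70450, 70452), (70453, 70458), (70459, 70469), (70471, 70473), (70475, 70478), (70480, 70481),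
  (70487, 70488), (70493, 70500), (70502, 70509), (70512, 70517), (70656, 70748), (70749, 70754), (70784, 70856), (70864, 70874),
  (71040, 71094), (71096, 71134), (71168, 71237), (71248, 71258), (71264, 71277), (71296, 71354), (71360, 71370), (71424, 71451),
  (71453, 71468), (71472, 71495), (71680, 71740), (71840, 71923), (71935, 71943), (71945, 71946), (71948, 71956), (71957, 71959),
  (71960, 71990), (71991, 71993), (71995, 72007), (72016, 72026), (72096, 72104), (72106, 72152), (72154, 72165), (72192, 72264),
  (72272, 72355), (72368, 72441), (72704, 72713), (72714, 72759), (72760, 72774), (72784, 72813), (72816, 72848), (72850, 72872),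
  (72873, 72887), (72960, 72967), (72968, 72970), (72971, 73015), (73018, 73019), (73020, 73022), (73023, 73032), (73040, 73050),
  (73056, 73062), (73063, 73065), (73066, 73103), (73104, 73106), (73107, 73113), (73120, 73130), (73440, 73465), (73648, 73649),
  (73664, 73714), (73727, 74650), (74752, 74863), (74864, 74869), (74880, 75076), (77712, 77811), (77824, 78895), (82944, 83527),
  (92160, 92729), (92736, 92767), (92768, 92778), (92782, 92863), (92864, 92874), (92880, 92910), (92912, 92918), (92928, 92998),
  (93008, 93018), (93019, 93026), (93027, 93048), (93053, 93072), (93760, 93851), (93952, 94027), (94031, 94088), (94095, 94112),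
  (94176, 94181), (94192, 94194), (94208, 100344), (100352, 101590), (101632, 101641), (110576, 110580), (110581, 110588), (110589, 110591),
  (110592, 110883), (110928, 110931), (110948, 110952), (110960, 111356), (113664, 113771), (113776, 113789), (113792, 113801), (113808, 113818),
  (113820, 113824), (118528, 118574), (118576, 118599), (118608, 118724), (118784, 119030), (119040, 119079), (119081, 119155), (119163, 119275),
  (119296, 119366), (119520, 119540), (119552, 119639), (119648, 119673), (119808, 119893), (119894, 119965), (119966, 119968), (119970, 119971),
  (119973, 119975), (119977, 119981), (119982, 119994), (119995, 119996), (119997, 120004), (120005, 120070), (120071, 120075), (120077, 120085),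
  (120086, 120093), (120094, 120122), (120123, 120127), (120128, 120133), (120134, 120135), (120138, 120145), (120146, 120486), (120488, 120780),
  (120782, 121484), (121499, 121504), (121505, 121520), (122624, 122655), (122880, 122887), (122888, 122905), (122907, 122914), (122915, 122917),
  (122918, 122923), (123136, 123181), (123184, 123198), (123200, 123210), (123214, 123216), (123536, 123567), (123584, 123642), (123647, 123648),
  (124896, 124903), (124904, 124908), (124909, 124911), (124912, 124927), (124928, 125125), (125127, 125143), (125184, 125260), (125264, 125274),
  (125278, 125280), (126065, 126133), (126209, 126270), (126464, 126468), (126469, 126496), (126497, 126499), (126500, 126501), (126503, 126504),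
  (126505, 126515), (126516, 126520), (126521, 126522), (126523, 126524), (126530, 126531), (126535, 126536), (126537, 126538), (126539, 126540),
  (126541, 126544), (126545, 126547), (126548, 126549), (126551, 126552), (126553, 126554), (126555, 126556), (126557, 126558), (126559, 126560),
  (126561, 126563), (126564, 126565), (126567, 126571), (126572, 126579), (126580, 126584), (126585, 126589), (126590, 126591), (126592, 126602),
  (126603, 126620), (126625, 126628), (126629, 126634), (126635, 126652), (126704, 126706), (126976, 127020), (127024, 127124), (127136, 127151),
  (127153, 127168), (127169, 127184), (127185, 127222), (127232, 127406), (127462, 127491), (127504, 127548), (127552, 127561), (127568, 127570),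
  (127584, 127590), (127744, 128728), (128733, 128749), (128752, 128765), (128768, 128884), (128896, 128985), (128992, 129004), (129008, 129009),
  (129024, 129036), (129040, 129096), (129104, 129114), (129120, 129160), (129168, 129198), (129200, 129202), (129280, 129620), (129632, 129646),
  (129648, 129653), (129656, 129661), (129664, 129671), (129680, 129709), (129712, 129723), (129728, 129734), (129744, 129754), (129760, 129768),
  (129776, 129783), (129792, 129939), (129940, 129995), (130032, 130042), (131072, 173792), (173824, 177977), (177984, 178206), (178208, 183970),
  (183984, 191457), (194560, 195102), (196608, 201547), (917760, 918000)]

-- port of the Python built-in `chr(c).isprintable()` (exact on 0 <= c < 0x110000, the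
-- codepoints Pre_ admits; outside that Python's chr raises and Pre_ excludes the input)
def pyIsPrintable (c : Int) : Bool :=
  printableTable.any (fun p => decide (p.1 ≤ c) && decide (c < p.2))

-- the for-loop of A: state = (ranges, range_start)
def loopA : List Int → List (Int × Int) → Option Int → List (Int × Int) × Option Int
  | [], ranges, range_start => (ranges, range_start)
  | c :: cs, ranges, range_start =>
    if pyIsPrintable c then
      match range_start with
      | none => loopA cs ranges (some c)
      | some s => loopA cs ranges (some s)
    else
      match range_start with
      | none => loopA cs ranges none
      | some s => loopA cs (ranges ++ [(s, c)]) none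

def printable_ranges (lower_bound : Int) (upper_bound : Int) : List (Int × Int) :=
  match loopA (PySem.List.pyRange lower_bound upper_bound 1) [] none with
  | (ranges, none) => ranges
  | (ranges, some s) => ranges ++ [(s, upper_bound)]

-- ===== PORT B =====
-- Source B's _DELTAS: the printable ranges as (gap from previous range's end, length) pairs
def deltaTable : List (Int × Int) := [
  (32, 95), (34, 12), (1, 714), (2, 6), (4, 7), (1, 1), (1, 20), (1, 397),
  (1, 38), (2, 50), (2, 3), (1, 55), (8, 27), (4, 6), (17, 22), (1, 192),
  (1, 48), (2, 59), (2, 101), (14, 59), (2, 49), (2, 15), (1, 28), (2, 1),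
  (1, 11), (5, 31), (9, 74), (1, 161), (1, 8), (2, 2), (2, 22), (1, 7),
  (1, 1), (3, 4), (2, 9), (2, 2), (2, 4), (8, 1), (4, 2), (1, 5),
  (2, 25), (2, 3), (1, 6), (4, 2), (2, 22), (1, 7), (1, 2), (1, 2),
  (1, 2), (2, 1), (1, 5), (4, 2), (2, 3), (3, 1), (7, 4), (1, 1),
  (7, 17), (10, 3), (1, 9), (1, 3), (1, 22), (1, 7), (1, 2), (1, 5),
  (2, 10), (1, 3), (1, 3), (2, 1), (15, 4), (2, 12), (7, 7), (1, 3),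
  (1, 8), (2, 2), (2, 22), (1, 7), (1, 2), (1, 5), (2, 9), (2, 2),
  (2, 3), (7, 3), (4, 2), (1, 5), (2, 18), (10, 2), (1, 6), (3, 3),
  (1, 4), (3, 2), (1, 1), (1, 2), (3, 2), (3, 3), (3, 12), (4, 5),
  (3, 3), (1, 4), (2, 1), (6, 1), (14, 21), (5, 13), (1, 3), (1, 23),
  (1, 16), (2, 9), (1, 3), (1, 4), (7, 2), (1, 3), (2, 1), (2, 4),
  (2, 10), (7, 22), (1, 3), (1, 23), (1, 10), (1, 5), (2, 9), (1, 3),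
  (1, 4), (7, 2), (6, 2), (1, 4), (2, 10), (1, 2), (13, 13), (1, 3),
  (1, 51), (1, 3), (1, 6), (4, 16), (2, 26), (1, 3), (1, 18), (3, 24),
  (1, 9), (1, 1), (2, 7), (3, 1), (4, 6), (1, 1), (1, 8), (6, 10),
  (2, 3), (12, 58), (4, 29), (37, 2), (1, 1), (1, 5), (1, 24), (1, 1),
  (1, 23), (2, 5), (1, 1), (1, 6), (2, 10), (2, 4), (32, 72), (1, 36),
  (4, 39), (1, 36), (1, 15), (1, 13), (37, 198), (1, 1), (5, 1), (2, 377),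
  (1, 4), (2, 7), (1, 1), (1, 4), (2, 41), (1, 4), (2, 33), (1, 4),
  (2, 7), (1, 1), (1, 4), (2, 15), (1, 57), (1, 4), (2, 67), (2, 32),
  (3, 26), (6, 86), (2, 6), (2, 640), (1, 28), (3, 89), (7, 22), (9, 24),
  (9, 20), (12, 13), (1, 3), (1, 2), (12, 94), (2, 10), (6, 10), (6, 14),
  (1, 11), (6, 89), (7, 43), (5, 70), (10, 31), (1, 12), (4, 12), (4, 1),
  (3, 42), (2, 5), (11, 44), (4, 26), (6, 11), (3, 62), (2, 65), (1, 29),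
  (2, 11), (6, 10), (6, 14), (2, 31), (49, 77), (3, 47), (1, 116), (8, 60),
  (3, 15), (3, 60), (7, 43), (2, 11), (8, 43), (5, 534), (2, 6), (2, 38),
  (2, 6), (2, 8), (1, 1), (1, 1), (1, 1), (1, 31), (2, 53), (1, 15),
  (1, 14), (2, 6), (1, 19), (2, 3), (1, 9), (17, 24), (8, 47), (17, 2),
  (2, 27), (1, 13), (3, 33), (15, 33), (15, 140), (4, 663), (25, 11), (21, 1812),
  (2, 32), (1, 349), (5, 45), (1, 1), (5, 1), (2, 56), (7, 2), (14, 24),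
  (9, 7), (1, 7), (1, 7), (1, 7), (1, 7), (1, 7), (1, 7), (1, 7),
  (1, 126), (34, 26), (1, 89), (12, 214), (26, 12), (5, 63), (1, 86), (2, 103),
  (5, 43), (1, 94), (1, 84), (12, 47), (1, 29293), (3, 55), (9, 348), (20, 184),
  (8, 203), (5, 2), (1, 1), (1, 5), (24, 59), (3, 10), (6, 56), (8, 70),
  (8, 12), (6, 116), (11, 30), (3, 78), (1, 11), (4, 33), (1, 55), (9, 14),
  (2, 10), (2, 103), (24, 28), (10, 6), (2, 6), (2, 6), (9, 7), (1, 7),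
  (1, 60), (4, 126), (2, 10), (6, 11172), (12, 23), (4, 49), (8452, 366), (2, 106),
  (38, 7), (12, 5), (5, 26), (1, 5), (1, 1), (1, 2), (1, 2), (1, 125),
  (16, 445), (2, 54), (7, 1), (32, 42), (6, 51), (1, 19), (1, 4), (4, 5),
  (1, 135), (4, 190), (3, 6), (2, 6), (2, 6), (2, 3), (3, 7), (1, 7),
  (13, 2), (2, 12), (1, 26), (1, 19), (1, 2), (1, 15), (2, 14), (34, 123),
  (5, 3), (4, 45), (3, 88), (1, 13), (3, 1), (47, 46), (130, 29), (3, 49),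
  (15, 28), (4, 36), (9, 30), (5, 43), (5, 30), (1, 37), (4, 14), (42, 158),
  (2, 10), (6, 36), (4, 36), (4, 40), (8, 52), (11, 12), (1, 15), (1, 7),
  (1, 2), (1, 11), (1, 15), (1, 7), (1, 2), (67, 311), (9, 22), (10, 8),
  (24, 6), (1, 42), (1, 9), (69, 6), (2, 1), (1, 44), (1, 2), (3, 1),
  (2, 23), (1, 72), (8, 9), (48, 19), (1, 2), (5, 33), (3, 27), (5, 1),
  (64, 56), (4, 20), (2, 50), (1, 2), (5, 8), (1, 3), (1, 29), (2, 3),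
  (4, 10), (7, 9), (7, 64), (32, 39), (4, 12), (9, 54), (3, 29), (2, 27),
  (5, 26), (7, 4), (12, 7), (80, 73), (55, 51), (13, 51), (7, 46), (8, 10),
  (294, 31), (1, 42), (1, 3), (2, 2), (78, 40), (8, 42), (22, 26), (38, 28),
  (20, 23), (9, 78), (4, 36), (9, 62), (1, 5), (13, 25), (7, 10), (6, 53),
  (1, 18), (8, 39), (9, 96), (1, 20), (11, 18), (1, 44), (65, 7), (1, 1),
  (1, 4), (1, 15), (1, 11), (6, 59), (5, 10), (6, 4), (1, 8), (2, 2),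
  (2, 22), (1, 7), (1, 2), (1, 5), (1, 10), (2, 2), (2, 3), (2, 1),
  (6, 1), (5, 7), (2, 7), (3, 5), (139, 92), (1, 5), (30, 72), (8, 10),
  (166, 54), (2, 38), (34, 69), (11, 10), (6, 13), (19, 58), (6, 10), (54, 27),
  (2, 15), (4, 23), (185, 60), (100, 83), (12, 8), (2, 1), (2, 8), (1, 2),
  (1, 30), (1, 2), (2, 12), (9, 10), (70, 8), (2, 46), (2, 11), (27, 72),
  (8, 83), (13, 73), (263, 9), (1, 45), (1, 14), (10, 29), (3, 32), (2, 22),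
  (1, 14), (73, 7), (1, 2), (1, 44), (3, 1), (1, 2), (1, 9), (8, 10),
  (6, 6), (1, 2), (1, 37), (1, 2), (1, 6), (7, 10), (310, 25), (183, 1),
  (15, 50), (13, 923), (102, 111), (1, 5), (11, 196), (2636, 99), (13, 1071), (4049, 583),
  (8633, 569), (7, 31), (1, 10), (4, 81), (1, 10), (6, 30), (2, 6), (10, 70),
  (10, 10), (1, 7), (1, 21), (5, 19), (688, 91), (101, 75), (4, 57), (7, 17),
  (64, 5), (11, 2), (14, 6136), (8, 1238), (42, 9), (8935, 4), (1, 7), (1, 2),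
  (1, 291), (45, 3), (17, 4), (8, 396), (2308, 107), (5, 13), (3, 9), (7, 10),
  (2, 4), (4704, 46), (2, 23), (9, 116), (60, 246), (10, 39), (2, 74), (8, 112),
  (21, 70), (154, 20), (12, 87), (9, 25), (135, 85), (1, 71), (1, 2), (2, 1),
  (2, 2), (2, 4), (1, 12), (1, 1), (1, 7), (1, 65), (1, 4), (2, 8),
  (1, 7), (1, 28), (1, 4), (1, 5), (1, 1), (3, 7), (1, 340), (2, 292),
  (2, 702), (15, 5), (1, 15), (1104, 31), (225, 7), (1, 17), (2, 7), (1, 2),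
  (1, 5), (213, 45), (3, 14), (2, 10), (4, 2), (320, 31), (17, 58), (5, 1),
  (1248, 7), (1, 4), (1, 2), (1, 15), (1, 197), (2, 16), (41, 76), (4, 10),
  (4, 2), (785, 68), (76, 61), (194, 4), (1, 27), (1, 2), (1, 1), (2, 1),
  (1, 10), (1, 4), (1, 1), (1, 1), (6, 1), (4, 1), (1, 1), (1, 1),
  (1, 3), (1, 2), (1, 1), (2, 1), (1, 1), (1, 1), (1, 1), (1, 1),
  (1, 2), (1, 1), (2, 4), (1, 7), (1, 4), (1, 4), (1, 1), (1, 10),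
  (1, 17), (5, 3), (1, 5), (1, 17), (52, 2), (270, 44), (4, 100), (12, 15),
  (2, 15), (1, 15), (1, 37), (10, 174), (56, 29), (13, 44), (4, 9), (7, 2),
  (14, 6), (154, 984), (5, 16), (3, 13), (3, 116), (12, 89), (7, 12), (4, 1),
  (15, 12), (4, 56), (8, 10), (6, 40), (8, 30), (2, 2), (78, 340), (12, 14),
  (2, 5), (3, 5), (3, 7), (9, 29), (3, 11), (5, 6), (10, 10), (6, 8),
  (8, 7), (9, 147), (1, 55), (37, 10), (1030, 42720), (32, 4153), (7, 222), (2, 5762),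
  (14, 7473), (3103, 542), (1506, 4939), (716213, 240)]

-- Source B's for-loop: decode the delta table on the fly (state pos = previous end),
-- break once a decoded range starts at/after upper, clip overlapping ranges.
def walkB : List (Int × Int) → Int → Int → Int → List (Int × Int)
  | [], _, _, _ => []
  | (gap, length) :: rest, pos, l, u =>
    let start := pos + gap
    let stop := start + length
    if u ≤ start then []
    else if l < stop then (max start l, min stop u) :: walkB rest stop l u
    else walkB rest stop l u

def printable_ranges_alt (lower_bound : Int) (upper_bound : Int) : List (Int × Int) :=
  if upper_bound ≤ lower_bound then []
  else walkB deltaTable 0 lower_bound upper_bound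

-- ===== PRECONDITION & SPEC =====
-- Pre_ excludes exactly the inputs on which A raises ValueError: a nonempty range
-- containing a codepoint outside [0, 0x110000), where Python's chr(c) fails.
def Pre_printable_ranges (lower_bound : Int) (upper_bound : Int) : Prop :=
  lower_bound < upper_bound → (0 ≤ lower_bound ∧ upper_bound ≤ 1114112)
instance (lower_bound : Int) (upper_bound : Int) : Decidable (Pre_printable_ranges lower_bound upper_bound) := by unfold Pre_printable_ranges; infer_instance
def pvWitness_printable_ranges : Int × Int := (30, 40)

def Spec_printable_ranges (lower_bound : Int) (upper_bound : Int) (out : List (Int × Int)) : Prop := out = printable_ranges_alt lower_bound upper_bound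
instance (lower_bound : Int) (upper_bound : Int) (out : List (Int × Int)) : Decidable (Spec_printable_ranges lower_bound upper_bound out) := by unfold Spec_printable_ranges; infer_instance

-- ===== CLAIM (what is proved, stated in full; the proofs are below) =====
def Claim_equal_printable_ranges : Prop := ∀ (lower_bound : Int) (upper_bound : Int), Dom_printable_ranges lower_bound upper_bound → Pre_printable_ranges lower_bound upper_bound → Spec_printable_ranges lower_bound upper_bound (printable_ranges lower_bound upper_bound)

-- ===== LEMMAS AND PROOFS =====

-- decode a delta table into absolute ranges, starting after position pos
def decodeD : Int → List (Int × Int) → List (Int × Int)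
  | _, [] => []
  | pos, (g, n) :: rest => (pos + g, pos + g + n) :: decodeD (pos + g + n) rest

-- reference clipping loop over an absolute range table
def clipLoop : List (Int × Int) → Int → Int → List (Int × Int)
  | [], _, _ => []
  | (s, e) :: rest, l, u =>
    if u ≤ s then []
    else if l < e then (max s l, min e u) :: clipLoop rest l u
    else clipLoop rest l u

-- walkB is clipLoop on the decoded table
theorem walkB_eq_clip (ds : List (Int × Int)) (pos l u : Int) :
    walkB ds pos l u = clipLoop (decodeD pos ds) l u := by
  induction ds generalizing pos with
  | nil => rfl
  | cons p rest ih =>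
    obtain ⟨g, n⟩ := p
    simp only [walkB, decodeD, clipLoop]
    rw [ih]

set_option maxRecDepth 16384 in
theorem decode_table : decodeD 0 deltaTable = printableTable := by decide

-- B as a clip of the absolute table
def clipAlt (l u : Int) : List (Int × Int) :=
  if u ≤ l then [] else clipLoop printableTable l u

theorem alt_eq (l u : Int) : printable_ranges_alt l u = clipAlt l u := by
  unfold printable_ranges_alt clipAlt
  by_cases h : u ≤ l
  · simp [h]
  · simp only [if_neg h]
    rw [walkB_eq_clip, decode_table]

-- well-formedness of a range table, relative to a strict lower bound on starts:
-- starts strictly increase past the previous end, each range is nonempty, ranges are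
-- separated by at least one gap codepoint (maximality of the table's ranges).
def okB : Int → List (Int × Int) → Bool
  | _, [] => true
  | b, (s, e) :: t => decide (b < s) && decide (s < e) && okB e t

-- membership of a codepoint in a range table (pyIsPrintable = memB printableTable)
def memB (t : List (Int × Int)) (c : Int) : Bool :=
  t.any (fun p => decide (p.1 ≤ c) && decide (c < p.2))

set_option maxRecDepth 8192 in
theorem table_ok : okB (-1) printableTable = true := by decide

theorem start_lb {b s e : Int} {t : List (Int × Int)} (hok : okB b t = true)
    (hmem : (s, e) ∈ t) : b < s ∧ s < e := by
  induction t generalizing b with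
  | nil => cases hmem
  | cons p rest ih =>
    obtain ⟨s', e'⟩ := p
    simp only [okB, Bool.and_eq_true, decide_eq_true_eq] at hok
    cases hmem with
    | head => exact ⟨hok.1.1, hok.1.2⟩
    | tail _ h =>
      have h2 := ih hok.2 h
      obtain ⟨⟨hb, hse⟩, _⟩ := hok
      exact ⟨by omega, h2.2⟩

theorem memB_low {b c : Int} {t : List (Int × Int)} (hok : okB b t = true)
    (hc : c ≤ b) : memB t c = false := by
  induction t generalizing b with
  | nil => rfl
  | cons p rest ih =>
    obtain ⟨s, e⟩ := p
    simp only [okB, Bool.and_eq_true, decide_eq_true_eq] at hok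
    obtain ⟨⟨hb, hse⟩, hrest⟩ := hok
    have h1 : memB rest c = false := ih hrest (by omega)
    simp only [memB, List.any_cons] at h1 ⊢
    simp only [h1, Bool.or_false, Bool.and_eq_false_iff, decide_eq_false_iff_not]
    omega

theorem memB_end {b s e : Int} {t : List (Int × Int)} (hok : okB b t = true)
    (hmem : (s, e) ∈ t) : memB t e = false := by
  induction t generalizing b with
  | nil => cases hmem
  | cons p rest ih =>
    obtain ⟨s', e'⟩ := p
    simp only [okB, Bool.and_eq_true, decide_eq_true_eq] at hok
    obtain ⟨⟨hb, hse⟩, hrest⟩ := hok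
    cases hmem with
    | head =>
      have h1 : memB rest e = false := memB_low hrest le_rfl
      simp only [memB, List.any_cons] at h1 ⊢
      simp only [h1, Bool.or_false, Bool.and_eq_false_iff, decide_eq_false_iff_not]
      omega
    | tail _ h =>
      obtain ⟨h2, h3⟩ := start_lb hrest h
      have h1 : memB rest e = false := ih hrest h
      simp only [memB, List.any_cons] at h1 ⊢
      simp only [h1, Bool.or_false, Bool.and_eq_false_iff, decide_eq_false_iff_not]
      omega

theorem memB_true {c : Int} {t : List (Int × Int)} (h : memB t c = true) :
    ∃ s e, (s, e) ∈ t ∧ s ≤ c ∧ c < e := by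
  simp only [memB, List.any_eq_true, Bool.and_eq_true, decide_eq_true_eq] at h
  obtain ⟨⟨s, e⟩, hmem, h1, h2⟩ := h
  exact ⟨s, e, hmem, h1, h2⟩

theorem memB_of_mem {c s e : Int} {t : List (Int × Int)} (hmem : (s, e) ∈ t)
    (h1 : s ≤ c) (h2 : c < e) : memB t c = true := by
  simp only [memB, List.any_eq_true, Bool.and_eq_true, decide_eq_true_eq]
  exact ⟨(s, e), hmem, h1, h2⟩

-- B-side: clipLoop does not depend on the lower bound once it is below all starts
theorem clip_indep {b l l' u : Int} {t : List (Int × Int)} (hok : okB b t = true)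
    (hl : l ≤ b) (hl' : l' ≤ b) : clipLoop t l u = clipLoop t l' u := by
  induction t generalizing b with
  | nil => rfl
  | cons p rest ih =>
    obtain ⟨s, e⟩ := p
    simp only [okB, Bool.and_eq_true, decide_eq_true_eq] at hok
    obtain ⟨⟨hb, hse⟩, hrest⟩ := hok
    by_cases h1 : u ≤ s
    · simp [clipLoop, h1]
    · simp only [clipLoop, if_neg h1, if_pos (show l < e by omega),
        if_pos (show l' < e by omega),
        max_eq_left (show l ≤ s by omega), max_eq_left (show l' ≤ s by omega)]
      rw [ih hrest (by omega) (by omega)]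

-- B-side: a non-printable lower end can be dropped
theorem clip_skip {b l u : Int} {t : List (Int × Int)} (hok : okB b t = true)
    (hmem : memB t l = false) : clipLoop t l u = clipLoop t (l + 1) u := by
  induction t generalizing b with
  | nil => rfl
  | cons p rest ih =>
    obtain ⟨s, e⟩ := p
    simp only [okB, Bool.and_eq_true, decide_eq_true_eq] at hok
    obtain ⟨⟨hb, hse⟩, hrest⟩ := hok
    simp only [memB, List.any_cons, Bool.or_eq_false_iff, Bool.and_eq_false_iff,
      decide_eq_false_iff_not, not_le, not_lt] at hmem
    obtain ⟨hhead, htail⟩ := hmem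
    have htail' : memB rest l = false := htail
    by_cases h1 : u ≤ s
    · simp [clipLoop, h1]
    · by_cases h2 : l < e
      · have hls : l < s := by rcases hhead with h | h <;> omega
        simp only [clipLoop, if_neg h1, if_pos h2, if_pos (show l + 1 < e by omega),
          max_eq_left (show l ≤ s by omega), max_eq_left (show l + 1 ≤ s by omega)]
        rw [ih hrest htail']
      · simp only [clipLoop, if_neg h1, if_neg h2, if_neg (show ¬ l + 1 < e by omega)]
        exact ih hrest htail'

theorem clip_empty {b l : Int} {t : List (Int × Int)} (hok : okB b t = true)
    (hmem : memB t l = false) : clipLoop t l (l + 1) = [] := by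
  induction t generalizing b with
  | nil => rfl
  | cons p rest ih =>
    obtain ⟨s, e⟩ := p
    simp only [okB, Bool.and_eq_true, decide_eq_true_eq] at hok
    obtain ⟨⟨hb, hse⟩, hrest⟩ := hok
    simp only [memB, List.any_cons, Bool.or_eq_false_iff, Bool.and_eq_false_iff,
      decide_eq_false_iff_not, not_le, not_lt] at hmem
    obtain ⟨hhead, htail⟩ := hmem
    by_cases h1 : l + 1 ≤ s
    · simp [clipLoop, h1]
    · have h2 : ¬ l < e := by rcases hhead with h | h <;> omega
      simp only [clipLoop, if_neg h1, if_neg h2]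
      exact ih hrest htail

-- B-side: a printable lower end emits the clip of its containing range
theorem clip_run {b l u s e : Int} {t : List (Int × Int)} (hok : okB b t = true)
    (hmem : (s, e) ∈ t) (hs : s ≤ l) (he : l < e) (hu : l < u) :
    clipLoop t l u = (l, min e u) :: (if e < u then clipLoop t e u else []) := by
  induction t generalizing b with
  | nil => cases hmem
  | cons p rest ih =>
    obtain ⟨s', e'⟩ := p
    simp only [okB, Bool.and_eq_true, decide_eq_true_eq] at hok
    obtain ⟨⟨hb, hse⟩, hrest⟩ := hok
    cases hmem with
    | head =>
      simp only [clipLoop, if_neg (show ¬ u ≤ s by omega), if_pos he,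
        max_eq_right hs]
      by_cases heu : e < u
      · simp only [if_pos heu]
        rw [if_neg (lt_irrefl e), clip_indep hrest (le_of_lt he) le_rfl]
      · simp only [if_neg heu]
        cases rest with
        | nil => rfl
        | cons q rest' =>
          obtain ⟨s'', e''⟩ := q
          simp only [okB, Bool.and_eq_true, decide_eq_true_eq] at hrest
          simp [clipLoop, show u ≤ s'' by omega]
    | tail _ h =>
      obtain ⟨h2, h3⟩ := start_lb hrest h
      simp only [clipLoop, if_neg (show ¬ u ≤ s' by omega),
        if_neg (show ¬ l < e' by omega)]
      rw [ih hrest h]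
      by_cases heu : e < u
      · simp only [if_pos heu]
        simp [show ¬ e < e' by omega]
      · simp [heu]

theorem alt_skip {l u : Int} (hmem : memB printableTable l = false) (hu : l < u) :
    clipAlt l u = clipAlt (l + 1) u := by
  unfold clipAlt
  rw [if_neg (by omega)]
  by_cases h : u ≤ l + 1
  · rw [if_pos h]
    have : u = l + 1 := by omega
    subst this
    exact clip_empty table_ok hmem
  · rw [if_neg h]
    exact clip_skip table_ok hmem

theorem alt_run {l u s e : Int} (hmem : (s, e) ∈ printableTable)
    (hs : s ≤ l) (he : l < e) (hu : l < u) :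
    clipAlt l u = (l, min e u) :: (if e < u then clipAlt e u else []) := by
  unfold clipAlt
  rw [if_neg (by omega)]
  rw [clip_run table_ok hmem hs he hu]
  by_cases heu : e < u
  · simp [heu, show ¬ u ≤ e by omega]
  · simp [heu]

-- A-side: the final append of A, split out for the proofs
def finishA (u : Int) : List (Int × Int) × Option Int → List (Int × Int)
  | (ranges, none) => ranges
  | (ranges, some s) => ranges ++ [(s, u)]

theorem pr_eq_finish (l u : Int) :
    printable_ranges l u = finishA u (loopA (PySem.List.pyRange l u 1) [] none) := by
  unfold printable_ranges finishA
  rcases loopA (PySem.List.pyRange l u 1) [] none with ⟨r, _ | s⟩ <;> rfl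

theorem finishA_cons (u : Int) (a : Int × Int) (xs : List (Int × Int)) (st : Option Int) :
    finishA u (a :: xs, st) = a :: finishA u (xs, st) := by
  cases st <;> rfl

-- A-side: the accumulator of loopA is a pure prefix
theorem loopA_acc (xs : List Int) (acc : List (Int × Int)) (st : Option Int) :
    loopA xs acc st = (acc ++ (loopA xs [] st).1, (loopA xs [] st).2) := by
  induction xs generalizing acc st with
  | nil => simp [loopA]
  | cons c cs ih =>
    cases st with
    | none =>
      cases hP : pyIsPrintable c
      · simp only [loopA, hP, Bool.false_eq_true, if_false]
        exact ih acc none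
      · simp only [loopA, hP, if_true]
        exact ih acc (some c)
    | some s =>
      cases hP : pyIsPrintable c
      · simp only [loopA, hP, Bool.false_eq_true, if_false]
        simp only [List.nil_append]
        rw [ih (acc ++ [(s, c)]) none, ih [(s, c)] none]
        simp
      · simp only [loopA, hP, if_true]
        exact ih acc (some s)

-- A-side: scanning a run of printable codepoints keeps the open range
theorem loopA_runs : ∀ (n : Nat) (l m u : Int), (m - l).toNat ≤ n →
    (∀ c, l ≤ c → c < m → pyIsPrintable c = true) → l ≤ m → m ≤ u →
    ∀ (acc : List (Int × Int)) (s0 : Int),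
    loopA (PySem.List.pyRange l u 1) acc (some s0)
      = loopA (PySem.List.pyRange m u 1) acc (some s0) := by
  intro n
  induction n with
  | zero =>
    intro l m u hn hP hlm hmu acc s0
    have : l = m := by omega
    subst this; rfl
  | succ n ih =>
    intro l m u hn hP hlm hmu acc s0
    by_cases hlm' : l = m
    · subst hlm'; rfl
    · have hl : l < m := by omega
      rw [PySem.List.pyRange_one_cons (show l < u by omega)]
      simp only [loopA, hP l le_rfl hl, if_true]
      exact ih (l + 1) m u (by omega) (fun c h1 h2 => hP c (by omega) h2) (by omega) hmu acc s0

theorem A_empty {l u : Int} (h : u ≤ l) : printable_ranges l u = [] := by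
  have hr : PySem.List.pyRange l u 1 = [] := by
    simp [PySem.List.pyRange]
    omega
  rw [pr_eq_finish, hr]
  rfl

theorem A_skip {l u : Int} (hP : pyIsPrintable l = false) (hu : l < u) :
    printable_ranges l u = printable_ranges (l + 1) u := by
  rw [pr_eq_finish, pr_eq_finish, PySem.List.pyRange_one_cons hu]
  simp only [loopA, hP, Bool.false_eq_true, if_false]

theorem A_run {l u s e : Int} (hmem : (s, e) ∈ printableTable)
    (hs : s ≤ l) (he : l < e) (hu : l < u) :
    printable_ranges l u = (l, min e u) :: (if e < u then printable_ranges e u else []) := by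
  have hPl : pyIsPrintable l = true := memB_of_mem hmem hs he
  rw [pr_eq_finish, PySem.List.pyRange_one_cons hu]
  simp only [loopA, hPl, if_true]
  by_cases heu : e < u
  · -- the run ends at e, inside [l, u)
    have hPe : pyIsPrintable e = false := memB_end table_ok hmem
    rw [loopA_runs (e - (l + 1)).toNat (l + 1) e u le_rfl
        (fun c h1 h2 => memB_of_mem hmem (by omega) h2) (by omega) (by omega)]
    rw [PySem.List.pyRange_one_cons heu]
    simp only [loopA, hPe, Bool.false_eq_true, if_false, List.nil_append]
    rw [loopA_acc]
    rw [min_eq_left (le_of_lt heu), if_pos heu]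
    rw [pr_eq_finish, PySem.List.pyRange_one_cons heu]
    simp only [loopA, hPe, Bool.false_eq_true, if_false]
    rw [show [(l, e)] ++ (loopA (PySem.List.pyRange (e + 1) u 1) [] none).1
        = (l, e) :: (loopA (PySem.List.pyRange (e + 1) u 1) [] none).1 from rfl]
    rw [finishA_cons]
  · -- the run reaches u
    rw [loopA_runs (u - (l + 1)).toNat (l + 1) u u le_rfl
        (fun c h1 h2 => memB_of_mem hmem (by omega) (by omega)) (by omega) le_rfl]
    have hr : PySem.List.pyRange u u 1 = [] := by
      simp [PySem.List.pyRange]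
    rw [hr, min_eq_right (by omega), if_neg heu]
    rfl

theorem main_eq : ∀ (n : Nat) (l u : Int), (u - l).toNat ≤ n →
    printable_ranges l u = clipAlt l u := by
  intro n
  induction n with
  | zero =>
    intro l u h
    have hul : u ≤ l := by omega
    rw [A_empty hul]
    unfold clipAlt
    rw [if_pos hul]
  | succ n ih =>
    intro l u h
    by_cases hul : u ≤ l
    · rw [A_empty hul]
      unfold clipAlt
      rw [if_pos hul]
    · replace hul : l < u := by omega
      cases hP : pyIsPrintable l
      · rw [A_skip hP hul, alt_skip hP hul]
        exact ih (l + 1) u (by omega)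
      · obtain ⟨s, e, hmem, hs, he⟩ := memB_true hP
        rw [A_run hmem hs he hul, alt_run hmem hs he hul]
        by_cases heu : e < u
        · rw [if_pos heu, if_pos heu, ih e u (by omega)]
        · rw [if_neg heu, if_neg heu]

-- ===== VERDICT (by name: the statement is the Claim_ definition above) =====
theorem printable_ranges_spec : Claim_equal_printable_ranges := by
  intro l u _ _
  unfold Spec_printable_ranges
  rw [alt_eq]
  exact main_eq (u - l).toNat l u le_rfl
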